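-- pv_equiv track=rewrite | github.com/seojh8910/algorithm | 프로그래머스/unrated/181926. 수 조작하기 1/수 조작하기 1.py | solution
-- ===== SOURCE A (Python) =====
-- def solution(n, control):
--     answer = n
--     for str in control:
--         if str == "w":
--             answer += 1
--         elif str == "s":
--             answer += -1
--         elif str == "d":
--             answer += 10
--         else:
--             answer += -10
--     return answer
-- ===== SOURCE B (Python) =====
-- WEIGHTS = {"w": 1, "s": -1, "d": 10}
--
--
-- def _delta(s):
--     # total increment contributed by s, by divide and conquer (addition is associative/commutative)
--     if len(s) == 0:
--         return 0
--     if len(s) == 1: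
--         return WEIGHTS.get(s, -10)
--     m = len(s) // 2
--     return _delta(s[:m]) + _delta(s[m:])
--
--
-- def solution(n, control):
--     return n + _delta(control)
-- ===== Notes on version B (the rewrite author's own statement) =====
-- stated objective: alternative
-- what changed: Replaces the left-to-right accumulating loop with a divide-and-conquer recursion: the string is split in halves, each half's total increment is computed recursively (single characters via a weight table), and the two totals are added to n; correct because the per-character increments are summed with associative/commutative addition.
import Mathlib
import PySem

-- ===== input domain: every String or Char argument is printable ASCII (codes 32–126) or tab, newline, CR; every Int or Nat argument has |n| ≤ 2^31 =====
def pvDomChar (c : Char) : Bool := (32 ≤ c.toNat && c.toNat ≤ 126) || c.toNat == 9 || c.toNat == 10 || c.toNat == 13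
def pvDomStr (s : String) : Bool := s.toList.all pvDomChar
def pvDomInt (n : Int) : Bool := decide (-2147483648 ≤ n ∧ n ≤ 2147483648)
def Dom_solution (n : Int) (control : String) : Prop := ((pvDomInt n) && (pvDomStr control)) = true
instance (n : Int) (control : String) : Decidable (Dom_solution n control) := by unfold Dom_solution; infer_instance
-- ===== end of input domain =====

-- B replaces A's left-to-right accumulating loop by a divide-and-conquer recursion over the
-- string (halves summed, single chars via a weight table); objective: alternative decomposition.

-- ===== PORT A =====
-- for str in control: if/elif chain updating answer
def solution (n : Int) (control : String) : Int :=
  control.toList.foldl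
    (fun answer c =>
      if c = 'w' then answer + 1
      else if c = 's' then answer + (-1)
      else if c = 'd' then answer + 10
      else answer + (-10)) n

-- ===== PORT B =====
-- WEIGHTS = {"w": 1, "s": -1, "d": 10}  (dict as association list; keys are 1-char strings,
-- looked up with the whole 1-char string s, ported on the char list)
def pvWEIGHTS : PySem.Dict (List Char) Int := PySem.Dict.ofList [(['w'], 1), (['s'], -1), (['d'], 10)]

-- _delta(s): divide and conquer; s[:m]/s[m:] with 0 ≤ m ≤ len s are exactly take/drop
def pvDelta (l : List Char) : Int :=
  if l.length = 0 then 0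
  else if l.length = 1 then PySem.Dict.getD pvWEIGHTS l (-10)
  else
    let m := l.length / 2
    pvDelta (l.take m) + pvDelta (l.drop m)
termination_by l.length
decreasing_by
  · simp only [List.length_take]; omega
  · simp only [List.length_drop]; omega

def solution_alt (n : Int) (control : String) : Int :=
  n + pvDelta control.toList

-- ===== PRECONDITION & SPEC =====
def Spec_solution (n : Int) (control : String) (out : Int) : Prop := out = solution_alt n control
instance (n : Int) (control : String) (out : Int) : Decidable (Spec_solution n control out) := by unfold Spec_solution; infer_instance

-- ===== CLAIM (what is proved, stated in full; the proofs are below) =====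
def Claim_equal_solution : Prop := ∀ (n : Int) (control : String), Dom_solution n control → Spec_solution n control (solution n control)

-- ===== LEMMAS AND PROOFS =====

def pvWeight (c : Char) : Int :=
  if c = 'w' then 1 else if c = 's' then -1 else if c = 'd' then 10 else -10

theorem pvDelta_eq_sum (l : List Char) : pvDelta l = (l.map pvWeight).sum := by
  induction l using pvDelta.induct with
  | case1 l h => rw [pvDelta]; simp_all [List.length_eq_zero_iff.mp h]
  | case2 l h h1 =>
    obtain ⟨c, rfl⟩ := List.length_eq_one_iff.mp h1
    by_cases hw : c = 'w'
    · subst hw; rw [pvDelta]; decide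
    · by_cases hs : c = 's'
      · subst hs; rw [pvDelta]; decide
      · by_cases hd : c = 'd'
        · subst hd; rw [pvDelta]; decide
        · rw [pvDelta]
          have hw' : ('w' == c) = false := by simp [Ne.symm hw]
          have hs' : ('s' == c) = false := by simp [Ne.symm hs]
          have hd' : ('d' == c) = false := by simp [Ne.symm hd]
          simp [PySem.Dict.getD, PySem.Dict.get?, PySem.Dict.ofList, PySem.Dict.update,
            PySem.Dict.insert, PySem.Dict.contains, PySem.Dict.empty, pvWEIGHTS, pvWeight,
            List.find?, hw', hs', hd', hw, hs, hd]
  | case3 l h h1 m ih1 ih2 =>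
    rw [pvDelta]
    simp only [h, h1, if_false]
    rw [ih1, ih2, ← List.sum_append, ← List.map_append, List.take_append_drop]

theorem foldl_eq_add_sum (l : List Char) (n : Int) :
    l.foldl
      (fun answer c =>
        if c = 'w' then answer + 1
        else if c = 's' then answer + (-1)
        else if c = 'd' then answer + 10
        else answer + (-10)) n = n + (l.map pvWeight).sum := by
  induction l generalizing n with
  | nil => simp
  | cons c t ih =>
    simp only [List.foldl_cons, List.map_cons, List.sum_cons, ih, pvWeight]
    split_ifs <;> ring

-- ===== VERDICT (by name: the statement is the Claim_ definition above) =====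
theorem solution_spec : Claim_equal_solution := by
  intro n control _
  unfold Spec_solution solution solution_alt
  rw [foldl_eq_add_sum, pvDelta_eq_sum]
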